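-- pv_equiv track=rewrite | github.com/miliar/Code_Jam_Webscraper | Solutions_python/Problem_177/4957.py | count
-- ===== SOURCE A (Python) =====
-- def count(number, digits):
--     newly_seen = 0
--     while number > 0:
--         current_digit = number % 10
--         if not digits[current_digit]:
--             newly_seen += 1
--             digits[current_digit] = True
--         number //= 10
--     return newly_seen
-- ===== SOURCE B (Python) =====
-- def count(number, digits):
--     present = 0
--     while number > 0:
--         present |= 1 << number % 10
--         number //= 10
--     old = 0
--     for i, flag in enumerate(digits):
--         if flag:
--             old |= 1 << i
--     new = present & ~old
--     newly_seen = 0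
--     for i in range(len(digits)):
--         if new >> i & 1:
--             digits[i] = True
--             newly_seen += 1
--     return newly_seen
-- ===== Notes on version B (the rewrite author's own statement) =====
-- stated objective: alternative
-- what changed: B replaces A's flag-guided while loop by bitmask set arithmetic: it peels the number into a presence bitmask, builds a bitmask of already-True flags, intersects with the complement (new = present & ~old), and one indexed sweep over the list counts and marks the bits of new.
import Mathlib
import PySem

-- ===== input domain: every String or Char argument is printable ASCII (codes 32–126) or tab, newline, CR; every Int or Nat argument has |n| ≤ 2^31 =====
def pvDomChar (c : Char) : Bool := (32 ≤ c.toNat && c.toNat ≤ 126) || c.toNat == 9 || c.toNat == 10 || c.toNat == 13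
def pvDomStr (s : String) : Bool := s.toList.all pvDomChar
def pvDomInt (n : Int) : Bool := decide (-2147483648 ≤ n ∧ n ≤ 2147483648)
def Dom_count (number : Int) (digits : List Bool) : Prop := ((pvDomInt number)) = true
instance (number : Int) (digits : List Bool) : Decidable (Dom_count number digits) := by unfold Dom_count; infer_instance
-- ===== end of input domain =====

-- B replaces A's flag-guided while loop by bitmask set arithmetic: peel the number into a presence
-- bitmask, build a bitmask of already-True flags, take new = present & ~old, then one indexed sweep
-- over the list marks and counts the bits of new. Return value proved equal; both mutate `digits`
-- to the same final state under Pre_ (the equivalence proved here is about the return value only).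


-- termination helper for the peel loops (number //= 10 strictly shrinks while number > 0)
theorem pvFloordiv10_toNat_lt (n : Int) (h : 0 < n) :
    (PySem.Int.floordiv n 10).toNat < n.toNat := by
  have hcast : PySem.Int.floordiv n 10 = ((n.toNat / 10 : Nat) : Int) := by
    have := PySem.Int.floordiv_natCast n.toNat 10
    rwa [Int.toNat_of_nonneg h.le] at this
  rw [hcast, Int.toNat_natCast]
  omega

-- ===== PORT A =====
-- the while loop of A: state (number, newly_seen, digits); `none` from pyGet? is Python's IndexError
def countALoop (number : Int) (newly_seen : Int) (digits : List Bool) : Int :=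
  if h : 0 < number then
    let cd := PySem.Int.mod number 10
    match PySem.List.pyGet? digits cd with
    | some b =>
        if !b then
          countALoop (PySem.Int.floordiv number 10) (newly_seen + 1) (PySem.List.pySetD digits cd true)
        else
          countALoop (PySem.Int.floordiv number 10) newly_seen digits
    | none => newly_seen   -- IndexError; excluded by Pre_count
  else newly_seen
termination_by number.toNat
decreasing_by all_goals exact pvFloordiv10_toNat_lt number h

def count (number : Int) (digits : List Bool) : Int :=
  countALoop number 0 digits

-- ===== PORT B =====
-- B's masks are Python ints built only by |= (1 << k) with k ≥ 0, hence nonnegative: Nat is exact.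
-- first loop of B: present |= 1 << number % 10 (number % 10 ≥ 0 while number > 0, so .toNat is exact)
def countPeelMask (number : Int) (present : Nat) : Nat :=
  if h : 0 < number then
    countPeelMask (PySem.Int.floordiv number 10)
      (present ||| (1 <<< (PySem.Int.mod number 10).toNat))
  else present
termination_by number.toNat
decreasing_by exact pvFloordiv10_toNat_lt number h

-- second loop of B: for i, flag in enumerate(digits): if flag: old |= 1 << i  (i ≥ 0, .toNat exact)
def countOldMask (digits : List Bool) : Nat :=
  (PySem.List.enumerate digits).foldl
    (fun old p => if p.2 then old ||| (1 <<< p.1.toNat) else old) 0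

-- body of B's final loop: if new >> i & 1: digits[i] = True; newly_seen += 1  (i ≥ 0 from range)
def countMarkStep (new : Nat) (st : Int × List Bool) (i : Int) : Int × List Bool :=
  if (new >>> i.toNat) &&& 1 = 1 then (st.1 + 1, PySem.List.pySetD st.2 i true) else st

def count_alt (number : Int) (digits : List Bool) : Int :=
  let present := countPeelMask number 0
  let old := countOldMask digits
  -- new = present & ~old : on nonnegative Python ints this is exactly Nat.ldiff
  let new := Nat.ldiff present old
  ((PySem.List.pyRange 0 (digits.length : Int) 1).foldl (countMarkStep new) (0, digits)).1

-- ===== PRECONDITION & SPEC =====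
-- A raises IndexError exactly when some decimal digit of `number` is ≥ len(digits); Pre_ excludes
-- exactly those inputs (for number ≤ 0 no digit is peeled, so Pre_ is vacuously true).
def Pre_count (number : Int) (digits : List Bool) : Prop :=
  ∀ d ∈ Nat.digits 10 number.toNat, d < digits.length
instance (number : Int) (digits : List Bool) : Decidable (Pre_count number digits) := by
  unfold Pre_count; infer_instance

def pvWitness_count : Int × List Bool :=
  (1230, [false, true, false, false, false, false, false, false, false, false])

def Spec_count (number : Int) (digits : List Bool) (out : Int) : Prop := out = count_alt number digits
instance (number : Int) (digits : List Bool) (out : Int) : Decidable (Spec_count number digits out) := by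
  unfold Spec_count; infer_instance

-- ===== CLAIM (what is proved, stated in full; the proofs are below) =====
def Claim_equal_count : Prop := ∀ (number : Int) (digits : List Bool), Dom_count number digits → Pre_count number digits → Spec_count number digits (count number digits)

-- ===== LEMMAS AND PROOFS =====

-- the peeled digit list of `number`, low digit first (proof device)
def digList (number : Int) : List Int :=
  if h : 0 < number then
    PySem.Int.mod number 10 :: digList (PySem.Int.floordiv number 10)
  else []
termination_by number.toNat
decreasing_by exact pvFloordiv10_toNat_lt number h

theorem digList_eq_digits (number : Int) :
    digList number = (Nat.digits 10 number.toNat).map (fun k : Nat => (k : Int)) := by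
  by_cases h : 0 < number
  · rw [digList]
    simp only [h, dif_pos]
    have hn : (number.toNat : Int) = number := Int.toNat_of_nonneg h.le
    have hpos : 0 < number.toNat := by omega
    have hmod : PySem.Int.mod number 10 = ((number.toNat % 10 : Nat) : Int) := by
      have := PySem.Int.mod_natCast number.toNat 10; rwa [hn] at this
    have hdiv : PySem.Int.floordiv number 10 = ((number.toNat / 10 : Nat) : Int) := by
      have := PySem.Int.floordiv_natCast number.toNat 10; rwa [hn] at this
    rw [hmod, hdiv, digList_eq_digits ((number.toNat / 10 : Nat) : Int),
        Nat.digits_def' (by norm_num : 1 < 10) hpos, Int.toNat_natCast]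
    rfl
  · rw [digList]
    simp only [h, dif_neg, not_false_iff]
    have : number.toNat = 0 := by omega
    simp [this]
termination_by number.toNat
decreasing_by simp only [Int.toNat_natCast]; omega

theorem digList_nonneg (number : Int) : ∀ d ∈ digList number, 0 ≤ d := by
  intro d hd
  rw [digList_eq_digits] at hd
  rcases List.mem_map.mp hd with ⟨k, -, hkd⟩
  rw [← hkd]; exact Int.natCast_nonneg k

-- range condition carried through the proofs
def InRng (l : List Int) (len : Nat) : Prop := ∀ d ∈ l, 0 ≤ d ∧ d.toNat < len

theorem pre_inrng (number : Int) (digits : List Bool) (hpre : Pre_count number digits) :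
    InRng (digList number) digits.length := by
  intro d hd
  rw [digList_eq_digits] at hd
  rcases List.mem_map.mp hd with ⟨k, hk, hkd⟩
  have h1 : (0 : Int) ≤ d := by rw [← hkd]; exact Int.natCast_nonneg k
  have h2 : d.toNat < digits.length := by rw [← hkd]; simpa using hpre k hk
  exact ⟨h1, h2⟩

-- A's loop body as a fold step (proof device)
def countStep (st : Int × List Bool) (d : Int) : Int × List Bool :=
  match PySem.List.pyGet? st.2 d with
  | some b => if !b then (st.1 + 1, PySem.List.pySetD st.2 d true) else st
  | none => st

-- A's while loop is the fold of countStep over the peeled digit list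
theorem countALoop_eq_foldl (number : Int) (ns : Int) (digits : List Bool)
    (hl : InRng (digList number) digits.length) :
    countALoop number ns digits = ((digList number).foldl countStep (ns, digits)).1 := by
  by_cases h : 0 < number
  · rw [countALoop, digList]
    simp only [h, dif_pos]
    have hx : (0 : Int) ≤ PySem.Int.mod number 10 ∧
        (PySem.Int.mod number 10).toNat < digits.length := by
      have := hl (PySem.Int.mod number 10) (by rw [digList]; simp [h])
      exact this
    have hget : PySem.List.pyGet? digits (PySem.Int.mod number 10) =
        some digits[(PySem.Int.mod number 10).toNat] := by
      rw [PySem.List.pyGet?_of_nonneg _ hx.1, List.getElem?_eq_getElem hx.2]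
    have htail : InRng (digList (PySem.Int.floordiv number 10)) digits.length := by
      intro d hd
      refine hl d ?_
      rw [digList]
      simp only [h, dif_pos, List.mem_cons]
      exact Or.inr hd
    rw [hget]
    cases hb : digits[(PySem.Int.mod number 10).toNat] with
    | true =>
      simp only [Bool.not_true, Bool.false_eq_true, if_false]
      rw [countALoop_eq_foldl (PySem.Int.floordiv number 10) ns digits htail]
      congr 1
      rw [List.foldl_cons]
      congr 1
      unfold countStep
      rw [hget, hb]
      simp
    | false =>
      simp only [Bool.not_false, if_pos]
      have hlen : (PySem.List.pySetD digits (PySem.Int.mod number 10) true).length =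
          digits.length := PySem.List.length_pySetD _ _ _
      have htail' : InRng (digList (PySem.Int.floordiv number 10))
          (PySem.List.pySetD digits (PySem.Int.mod number 10) true).length := by
        rw [hlen]; exact htail
      rw [countALoop_eq_foldl (PySem.Int.floordiv number 10) (ns + 1) _ htail']
      congr 1
      rw [List.foldl_cons]
      congr 1
      unfold countStep
      rw [hget, hb]
      simp
  · rw [countALoop, digList]
    simp [h]
termination_by number.toNat
decreasing_by all_goals exact pvFloordiv10_toNat_lt number h

-- the set of indices A newly marks (and counts), as a Finset
def cntSet (l : List Int) (ds : List Bool) : Finset Nat :=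
  (Finset.range ds.length).filter (fun i => ds[i]? = some false ∧ (i : Int) ∈ l)

-- the count accumulated by folding countStep is the cardinality of cntSet
theorem foldl_countStep_card (l : List Int) (ns : Int) (ds : List Bool)
    (hl : InRng l ds.length) :
    (l.foldl countStep (ns, ds)).1 = ns + ((cntSet l ds).card : Int) := by
  induction l generalizing ns ds with
  | nil =>
    simp [cntSet]
  | cons x l ih =>
    have hx := hl x (by simp)
    have hl' : InRng l ds.length := fun d hd => hl d (by simp [hd])
    have hget : PySem.List.pyGet? ds x = some ds[x.toNat] := by
      rw [PySem.List.pyGet?_of_nonneg _ hx.1, List.getElem?_eq_getElem hx.2]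
    rw [List.foldl_cons]
    cases hb : ds[x.toNat] with
    | true =>
      have hstep : countStep (ns, ds) x = (ns, ds) := by
        unfold countStep; rw [hget, hb]; simp
      rw [hstep, ih ns ds hl']
      have hEq : cntSet (x :: l) ds = cntSet l ds := by
        unfold cntSet
        apply Finset.filter_congr
        intro i hi
        rw [Finset.mem_range] at hi
        by_cases hix : (i : Int) = x
        · have hieq : i = x.toNat := by omega
          subst hieq
          simp [List.getElem?_eq_getElem hx.2, hb]
        · simp only [List.mem_cons]
          constructor
          · rintro ⟨h1, h2⟩
            exact ⟨h1, h2.resolve_left hix⟩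
          · rintro ⟨h1, h2⟩
            exact ⟨h1, Or.inr h2⟩
      rw [hEq]
    | false =>
      have hstep : countStep (ns, ds) x = (ns + 1, PySem.List.pySetD ds x true) := by
        unfold countStep; rw [hget, hb]; simp
      have hset : PySem.List.pySetD ds x true = ds.set x.toNat true :=
        PySem.List.pySetD_of_nonneg _ _ hx.1
      have hlen : (ds.set x.toNat true).length = ds.length := by simp
      have hl'' : InRng l (ds.set x.toNat true).length := by rw [hlen]; exact hl'
      rw [hstep, hset, ih (ns + 1) _ hl'']
      have hkey : cntSet (x :: l) ds = insert x.toNat (cntSet l (ds.set x.toNat true)) := by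
        unfold cntSet
        ext i
        simp only [Finset.mem_insert, Finset.mem_filter, Finset.mem_range, List.length_set,
          List.mem_cons]
        by_cases hix : i = x.toNat
        · subst hix
          constructor
          · intro _
            exact Or.inl rfl
          · intro _
            refine ⟨hx.2, ?_, Or.inl (by omega)⟩
            rw [List.getElem?_eq_getElem hx.2, hb]
        · have hgs : (ds.set x.toNat true)[i]? = ds[i]? := List.getElem?_set_ne (by omega)
          have hxi : ¬ ((i : Int) = x) := by omega
          constructor
          · rintro ⟨h1, h2, h3 | h3⟩
            · exact absurd h3 hxi
            · exact Or.inr ⟨h1, by rw [hgs]; exact h2, h3⟩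
          · rintro (h | ⟨h1, h2, h3⟩)
            · exact absurd h hix
            · refine ⟨h1, ?_, Or.inr h3⟩
              rw [hgs] at h2
              exact h2
      have hnotmem : x.toNat ∉ cntSet l (ds.set x.toNat true) := by
        unfold cntSet
        simp only [Finset.mem_filter, Finset.mem_range, not_and]
        intro _ hc
        rw [List.getElem?_set_self (by simpa using hx.2)] at hc
        simp at hc
      rw [hkey, Finset.card_insert_of_notMem hnotmem]
      push_cast
      ring

-- bit i of the peel mask marks membership of i in the digit list
theorem countPeelMask_testBit (number : Int) (m : Nat) (i : Nat) :
    (countPeelMask number m).testBit i =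
      (m.testBit i || decide ((i : Int) ∈ digList number)) := by
  by_cases h : 0 < number
  · rw [countPeelMask, digList]
    simp only [h, dif_pos]
    rw [countPeelMask_testBit (PySem.Int.floordiv number 10)]
    have hd : 0 ≤ PySem.Int.mod number 10 := by
      have := digList_nonneg number (PySem.Int.mod number 10) (by rw [digList]; simp [h])
      exact this
    have h1 : ((1 : Nat) <<< (PySem.Int.mod number 10).toNat).testBit i =
        decide ((i : Int) = PySem.Int.mod number 10) := by
      rw [Nat.one_shiftLeft, Nat.testBit_two_pow]
      by_cases hc : (PySem.Int.mod number 10).toNat = i <;> simp [hc] <;> omega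
    rw [Nat.testBit_or, h1]
    simp only [List.mem_cons]
    by_cases h2 : (i : Int) = PySem.Int.mod number 10 <;>
      by_cases h3 : (i : Int) ∈ digList (PySem.Int.floordiv number 10) <;>
        simp [h2, Bool.or_assoc]
  · rw [countPeelMask, digList]
    simp [h]
termination_by number.toNat
decreasing_by exact pvFloordiv10_toNat_lt number h

-- bit i of the old-flags mask is digits[i] (False beyond the end)
theorem countOldMask_aux (l : List Bool) (s : Nat) (acc : Nat) (i : Nat) :
    ((PySem.List.enumerate l (s : Int)).foldl
        (fun old p => if p.2 then old ||| (1 <<< p.1.toNat) else old) acc).testBit i =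
      (acc.testBit i || (decide (s ≤ i) && l.getD (i - s) false)) := by
  induction l generalizing s acc with
  | nil =>
    simp [PySem.List.enumerate_nil]
  | cons x l ih =>
    rw [PySem.List.enumerate_cons]
    have hcast : ((s : Int) + 1) = ((s + 1 : Nat) : Int) := by push_cast; ring
    rw [List.foldl_cons]
    cases x with
    | false =>
      rw [if_neg (by simp), hcast, ih]
      rcases Nat.lt_trichotomy i s with hc | hc | hc
      · rw [decide_eq_false (by omega : ¬ s ≤ i), decide_eq_false (by omega : ¬ s + 1 ≤ i)]
        simp
      · subst hc
        rw [decide_eq_true (le_refl i), decide_eq_false (by omega : ¬ i + 1 ≤ i),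
            Nat.sub_self]
        simp [List.getD]
      · have hsub : i - s = (i - (s + 1)) + 1 := by omega
        rw [decide_eq_true (by omega : s ≤ i), decide_eq_true (by omega : s + 1 ≤ i), hsub]
        simp [List.getD]
    | true =>
      rw [if_pos rfl, hcast, ih]
      have hsb : ((acc ||| (1 <<< ((s : Int)).toNat)).testBit i) =
          (acc.testBit i || decide (i = s)) := by
        rw [Nat.testBit_or, Int.toNat_natCast, Nat.one_shiftLeft, Nat.testBit_two_pow]
        by_cases hc : s = i <;> simp [hc] <;> omega
      rw [hsb]
      rcases Nat.lt_trichotomy i s with hc | hc | hc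
      · rw [decide_eq_false (by omega : ¬ s ≤ i), decide_eq_false (by omega : ¬ s + 1 ≤ i),
            decide_eq_false (by omega : ¬ i = s)]
        simp
      · subst hc
        rw [decide_eq_true (le_refl i), decide_eq_false (by omega : ¬ i + 1 ≤ i),
            decide_eq_true (rfl : i = i), Nat.sub_self]
        simp [List.getD]
      · have hsub : i - s = (i - (s + 1)) + 1 := by omega
        rw [decide_eq_true (by omega : s ≤ i), decide_eq_true (by omega : s + 1 ≤ i),
            decide_eq_false (by omega : ¬ i = s), hsub]
        simp [List.getD]

theorem countOldMask_testBit (digits : List Bool) (i : Nat) :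
    (countOldMask digits).testBit i = digits.getD i false := by
  have h0 : ((0 : Nat) : Int) = (0 : Int) := rfl
  have := countOldMask_aux digits 0 0 i
  rw [h0] at this
  unfold countOldMask
  rw [this]
  simp

-- (new >> i) & 1 == 1 is testBit
theorem and_one_eq_testBit (new i : Nat) :
    ((new >>> i) &&& 1 = 1) ↔ new.testBit i = true := by
  rw [Nat.testBit, Nat.and_comm]
  cases h : (new >>> i) &&& 1 <;> simp_all [Nat.and_one_is_mod]
  omega

-- the mark loop's count is a countP of the bit test over its index list
theorem foldl_countMarkStep (r : List Int) (new : Nat) (ns : Int) (ds : List Bool) :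
    (r.foldl (countMarkStep new) (ns, ds)).1 =
      ns + (r.countP (fun i => decide ((new >>> i.toNat) &&& 1 = 1)) : Int) := by
  induction r generalizing ns ds with
  | nil => simp
  | cons x r ih =>
    rw [List.foldl_cons, List.countP_cons]
    by_cases hc : (new >>> x.toNat) &&& 1 = 1
    · rw [show countMarkStep new (ns, ds) x = (ns + 1, PySem.List.pySetD ds x true) from by
        unfold countMarkStep; rw [if_pos hc], ih]
      simp only [hc, decide_true, if_pos]
      push_cast
      ring
    · rw [show countMarkStep new (ns, ds) x = (ns, ds) from by
        unfold countMarkStep; rw [if_neg hc], ih]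
      have hbt : new.testBit x.toNat = false := by
        cases hbt : new.testBit x.toNat
        · rfl
        · exact absurd ((and_one_eq_testBit new x.toNat).mpr hbt) hc
      simp [hbt]

-- countP over List.range equals the card of the filtered Finset.range
theorem countP_range_eq_card (n : Nat) (p : Nat → Bool) :
    (List.range n).countP p = ((Finset.range n).filter (fun i => p i = true)).card := by
  induction n with
  | zero => simp
  | succ n ih =>
    rw [List.range_succ, List.countP_append, Finset.range_add_one, Finset.filter_insert]
    by_cases hp : p n = true
    · rw [if_pos hp, Finset.card_insert_of_notMem (by simp)]
      simp [hp, ih]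
    · rw [if_neg hp]
      simp [hp, ih]

-- ===== VERDICT (by name: the statement is the Claim_ definition above) =====
theorem count_spec : Claim_equal_count := by
  intro number digits _hdom hpre
  unfold Spec_count count count_alt
  have hrng := pre_inrng number digits hpre
  rw [countALoop_eq_foldl number 0 digits hrng,
      foldl_countStep_card (digList number) 0 digits hrng,
      foldl_countMarkStep, zero_add, zero_add]
  congr 1
  set new := Nat.ldiff (countPeelMask number 0) (countOldMask digits) with hnew
  -- rewrite B's countP over pyRange into a card over Finset.range
  rw [PySem.List.pyRange_one]
  simp only [Int.sub_zero, Int.toNat_natCast]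
  rw [List.countP_map]
  have hpred : ∀ k : Nat, (fun i : Int => decide ((new >>> i.toNat) &&& 1 = 1)) ((0 : Int) + (k : Int))
      = decide (new.testBit k = true) := by
    intro k
    have ht : ((0 : Int) + (k : Int)).toNat = k := by omega
    simp only [ht]
    by_cases hc : (new >>> k) &&& 1 = 1
    · simp [hc, (and_one_eq_testBit new k).mp hc]
    · have := (and_one_eq_testBit new k).not.mp hc
      simp [hc, this]
  rw [show ((fun i : Int => decide ((new >>> i.toNat) &&& 1 = 1)) ∘ (fun k : Nat => (0 : Int) + (k : Int)))
      = (fun k : Nat => decide (new.testBit k = true)) from funext hpred]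
  rw [countP_range_eq_card]
  -- now both sides are filtered cards over Finset.range digits.length
  unfold cntSet
  congr 1
  apply Finset.filter_congr
  intro i hi
  rw [Finset.mem_range] at hi
  rw [hnew, Nat.testBit_ldiff, countPeelMask_testBit, countOldMask_testBit]
  have hz : (0 : Nat).testBit i = false := Nat.zero_testBit i
  have hgd : digits.getD i false = digits[i] := List.getD_eq_getElem digits false hi
  rw [hz, hgd, Bool.false_or]
  cases hb : digits[i] with
  | true =>
    simp [List.getElem?_eq_getElem hi, hb]
  | false =>
    simp [List.getElem?_eq_getElem hi, hb]
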